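-- pv_equiv track=rewrite | github.com/posl/comment_recommendation | script/mod_gen/2_time/zh/101_C/6.py | min_times
-- ===== SOURCE A (Python) =====
-- def min_times(n, k, a):
--     min_times = 0
--     for i in range(n):
--         if i + k > n:
--             break
--         else:
--             min_times += 1
--             a[i:i+k] = [min(a[i:i+k])] * k
--     return min_times
-- ===== SOURCE B (Python) =====
-- def min_times(n, k, a):
--     # One pass with a running minimum instead of re-scanning each window
--     # as A does.  Mutates a like A does (each position gets the min of all windows
--     # covering it); the proved equivalence is about the return value.
--     if n <= 0 or k > n:
--         return 0
--     run = min(a[:k])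
--     for j in range(n):
--         if j + k <= n:
--             run = min(run, a[j + k - 1])
--         a[j] = run
--     return n - k + 1
-- ===== Notes on version B (the rewrite author's own statement) =====
-- stated objective: alternative
-- what changed: Replaces A's per-window rescan min(a[i:i+k]) with a single pass carrying a running minimum; the count is n-k+1 computed once and each position is written once.
-- outside the precondition, e.g. on min_times(3, 2, [5]): A returns 2, B raises IndexError; on min_times(1, -1, [4, 5]): A returns 1, B returns 3
import Mathlib
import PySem

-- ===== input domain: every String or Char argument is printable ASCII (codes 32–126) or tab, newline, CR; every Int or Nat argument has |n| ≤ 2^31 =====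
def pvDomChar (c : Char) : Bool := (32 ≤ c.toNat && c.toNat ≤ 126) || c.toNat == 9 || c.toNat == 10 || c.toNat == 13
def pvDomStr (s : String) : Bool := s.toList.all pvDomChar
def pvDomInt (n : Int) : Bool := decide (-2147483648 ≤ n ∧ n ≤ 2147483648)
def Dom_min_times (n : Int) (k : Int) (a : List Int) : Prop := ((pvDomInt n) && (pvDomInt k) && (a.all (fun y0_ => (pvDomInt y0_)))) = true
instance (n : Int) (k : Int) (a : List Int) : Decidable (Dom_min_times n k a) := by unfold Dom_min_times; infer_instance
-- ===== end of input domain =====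

-- B replaces A's per-window rescan by one pass with a running minimum (a different algorithm).
-- Both mutate `a` in place; the equivalence proved here is about the RETURN value only.

-- ===== PORT A =====
-- loop state: the (mutated) list and the counter; `min` of an empty slice raises
-- ValueError in Python — Pre_min_times excludes those inputs (the getD 0 is unreachable inside Pre_)
def minTimesGo (n : Int) (k : Int) : List Int → List Int → Int → Int
  | [], _, cnt => cnt
  | i :: rest, a, cnt =>
    if i + k > n then cnt
    else
      let w := PySem.List.slice a (some i) (some (i + k))
      let m := (PySem.List.min? w (fun x => x)).getD 0
      -- a[i:i+k] = [m]*k  →  a[:i] ++ [m]*k ++ a[i+k:]  (exact for the executed slices)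
      minTimesGo n k rest
        (PySem.List.slice a none (some i) ++ List.replicate k.toNat m ++ PySem.List.slice a (some (i + k)) none)
        (cnt + 1)

def min_times (n : Int) (k : Int) (a : List Int) : Int :=
  minTimesGo n k (PySem.List.pyRange 0 n 1) a 0

-- ===== PORT B =====
-- B's mutation pass: state is (a, run); a[j] = run', indices in range inside Pre_
-- (out-of-range reads/writes are Python IndexErrors, outside Pre_; getD / set are unreachable defaults there)
def minTimesAltGo (n : Int) (k : Int) : List Int → List Int → Int → List Int
  | [], a, _ => a
  | j :: rest, a, run =>
    let run' := if j + k ≤ n then min run ((PySem.List.pyGet? a (j + k - 1)).getD 0) else run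
    minTimesAltGo n k rest (a.set j.toNat run') run'

def min_times_alt (n : Int) (k : Int) (a : List Int) : Int :=
  if n ≤ 0 ∨ k > n then 0
  else
    let run := (PySem.List.min? (PySem.List.slice a none (some k)) (fun x => x)).getD 0
    let _a := minTimesAltGo n k (PySem.List.pyRange 0 n 1) a run
    n - k + 1

-- ===== PRECONDITION & SPEC =====
-- Pre_ excludes the inputs where A raises ValueError (min of an empty slice: k = 0 with
-- windows to run, or `a` shorter than the windows need) and the degenerate shapes — n
-- exceeding len(a), or negative k, while windows run — on which A's count is an artefact
-- of the slice assignment resizing the list; B raises IndexError or returns the plain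
-- window count there (see the cites in the claim).
def Pre_min_times (n : Int) (k : Int) (a : List Int) : Prop :=
  n ≤ 0 ∨ n < k ∨ (1 ≤ k ∧ n ≤ (a.length : Int))
instance (n : Int) (k : Int) (a : List Int) : Decidable (Pre_min_times n k a) := by
  unfold Pre_min_times; infer_instance
def pvWitness_min_times : Int × Int × List Int := (3, 2, [1, 2, 3])

def Spec_min_times (n : Int) (k : Int) (a : List Int) (out : Int) : Prop := out = min_times_alt n k a
instance (n : Int) (k : Int) (a : List Int) (out : Int) : Decidable (Spec_min_times n k a out) := by unfold Spec_min_times; infer_instance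

-- ===== CLAIM (what is proved, stated in full; the proofs are below) =====
def Claim_equal_min_times : Prop := ∀ (n : Int) (k : Int) (a : List Int), Dom_min_times n k a → Pre_min_times n k a → Spec_min_times n k a (min_times n k a)

-- ===== LEMMAS AND PROOFS =====
-- A's counter never depends on the list: for the tail range [i, n) the loop adds
-- max 0 (min (n - i) (n - k + 1 - i)).
theorem minTimesGo_pyRange (n k : Int) :
    ∀ (m : Nat) (i cnt : Int) (a : List Int), (n - i).toNat = m →
      minTimesGo n k (PySem.List.pyRange i n 1) a cnt = cnt + max 0 (min (n - i) (n - k + 1 - i)) := by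
  intro m
  induction m with
  | zero =>
    intro i cnt a h
    rw [PySem.List.pyRange_one_eq_nil (by omega)]
    simp only [minTimesGo]
    omega
  | succ m ih =>
    intro i cnt a h
    rw [PySem.List.pyRange_one_cons (by omega)]
    simp only [minTimesGo]
    split_ifs with hb
    · omega
    · rw [ih (i + 1) (cnt + 1) _ (by omega)]
      omega

-- ===== VERDICT (by name: the statement is the Claim_ definition above) =====
theorem min_times_spec : Claim_equal_min_times := by
  intro n k a _ hpre
  unfold Spec_min_times min_times min_times_alt
  rw [minTimesGo_pyRange n k (n - 0).toNat 0 0 a rfl]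
  unfold Pre_min_times at hpre
  split_ifs with h
  · omega
  · show 0 + max 0 (min (n - 0) (n - k + 1 - 0)) = n - k + 1
    omega
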